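-- pv_equiv track=rewrite | github.com/PKU-MoCCA/dextercap | ObjectReconstruction/rubikscube.py | _get_face_color
-- ===== SOURCE A (Python) =====
-- COLORS = {
--     "yellow": (255, 255, 0),
--     "white": (255, 255, 255),
--     "orange": (255, 120, 0),
--     "red": (255, 0, 0),
--     "blue": (0, 0, 255),
--     "green": (0, 128, 0),
--     "hidden": (255, 255, 255),  # Internal faces are white
-- }
--
-- FACE_COLORS_SOLVED = {
--     (0, 1): "red",  # +X (Right)
--     (0, -1): "orange",  # -X (Left)
--     (1, 1): "yellow",  # +Y (Up)
--     (1, -1): "white",  # -Y (Down)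
--     (2, 1): "blue",  # +Z (Front)
--     (2, -1): "green",  # -Z (Back)
-- }
--
-- def _get_face_color(
--
--     cubelet_pos_id: tuple[int, int, int],
--     face_normal_in_cubelet_frame: tuple[int, int],
-- ) -> tuple[int, int, int]:
--     """
--     Determines the color of a cubelet's face in the solved state.
--     Internal faces are colored white.
--
--     Parameters:
--     - cubelet_pos_id (tuple[int, int, int]): Identifier for the cubelet's position (-1 or 1 for x, y, z).
--                                              e.g., (-1, -1, -1) is the bottom-left-back cubelet.
--     - face_normal_in_cubelet_frame (tuple[int, int]): (axis_index, direction) of the face's normal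
--                                                       in the cubelet's local coordinate system.
--                                                       e.g., (0, 1) means face normal is along +X in cubelet's frame.
--
--     Returns:
--     - tuple[int, int, int]: RGB color tuple (0-255).
--     """
--     for axis_idx in range(3):  # 0:X, 1:Y, 2:Z
--         # Check if the face is an outer face of the Rubik's cube assembly
--         if (
--             cubelet_pos_id[axis_idx] == face_normal_in_cubelet_frame[1]
--             and axis_idx == face_normal_in_cubelet_frame[0]
--         ):
--             # This face is on the "outside" of the Rubik's cube.
--             # Its color is determined by its world orientation in the solved state.
--             # The key for FACE_COLORS_SOLVED is (axis_idx_world, direction_world)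
--             world_axis_idx = axis_idx
--             world_direction = cubelet_pos_id[axis_idx]
--             return COLORS[FACE_COLORS_SOLVED[(world_axis_idx, world_direction)]]
--
--     return COLORS["hidden"]  # Internal face
-- ===== SOURCE B (Python) =====
-- # Dict-free reformulation: the six solved-face colors live in a flat list indexed
-- # arithmetically by 2*axis + (1 - direction)//2; a direction**2 == 1 parity guard
-- # plus the axis bound replace A's search loop and dictionary lookups.
-- _SOLVED_RGB = [
--     (255, 0, 0),      # (0, +1) red
--     (255, 120, 0),    # (0, -1) orange
--     (255, 255, 0),    # (1, +1) yellow
--     (255, 255, 255),  # (1, -1) white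
--     (0, 0, 255),      # (2, +1) blue
--     (0, 128, 0),      # (2, -1) green
-- ]
--
-- _HIDDEN = (255, 255, 255)
--
--
-- def _get_face_color(cubelet_pos_id, face_normal_in_cubelet_frame):
--     axis = face_normal_in_cubelet_frame[0]
--     direction = face_normal_in_cubelet_frame[1]
--     if direction * direction == 1 and 0 <= axis < 3 and cubelet_pos_id[axis] == direction:
--         return _SOLVED_RGB[2 * axis + (1 - direction) // 2]
--     return _HIDDEN
-- ===== Notes on version B (the rewrite author's own statement) =====
-- stated objective: alternative
-- what changed: Replaces A's search loop over the three axes with dict lookups by a dict-free arithmetic formulation: a parity guard direction*direction == 1 plus an axis bound, and the color read from a flat 6-entry list at index 2*axis + (1-direction)//2.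
import Mathlib
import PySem

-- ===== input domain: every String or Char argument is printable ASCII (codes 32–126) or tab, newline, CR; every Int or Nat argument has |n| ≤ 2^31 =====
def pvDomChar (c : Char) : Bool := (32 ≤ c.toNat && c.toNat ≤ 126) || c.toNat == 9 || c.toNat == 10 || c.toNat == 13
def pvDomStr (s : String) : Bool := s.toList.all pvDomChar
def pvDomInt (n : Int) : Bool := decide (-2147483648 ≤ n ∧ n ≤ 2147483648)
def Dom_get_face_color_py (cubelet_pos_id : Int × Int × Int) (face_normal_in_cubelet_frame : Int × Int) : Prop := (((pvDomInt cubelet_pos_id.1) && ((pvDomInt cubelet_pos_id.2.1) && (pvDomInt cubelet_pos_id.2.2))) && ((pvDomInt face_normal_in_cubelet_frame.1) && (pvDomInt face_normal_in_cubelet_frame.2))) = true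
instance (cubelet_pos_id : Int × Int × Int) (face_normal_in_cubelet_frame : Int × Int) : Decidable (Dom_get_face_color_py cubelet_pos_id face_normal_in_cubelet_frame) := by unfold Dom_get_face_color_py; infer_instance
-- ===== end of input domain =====

-- B replaces A's axis-search loop and its two dictionaries by a dict-free arithmetic
-- index into a flat 6-entry color list (objective: alternative).

-- ===== PORT A =====
-- the COLORS dict (association list, insertion order)
def pvColors : PySem.Dict String (Int × Int × Int) :=
  PySem.Dict.ofList [("yellow", (255, 255, 0)), ("white", (255, 255, 255)), ("orange", (255, 120, 0)),
   ("red", (255, 0, 0)), ("blue", (0, 0, 255)), ("green", (0, 128, 0)),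
   ("hidden", (255, 255, 255))]

-- the FACE_COLORS_SOLVED dict
def pvSolved : PySem.Dict (Int × Int) String :=
  PySem.Dict.ofList [((0, 1), "red"), ((0, -1), "orange"), ((1, 1), "yellow"),
   ((1, -1), "white"), ((2, 1), "blue"), ((2, -1), "green")]

-- COLORS[k]; every key A uses is present (default never reached)
def pvColorsGet (k : String) : Int × Int × Int :=
  (PySem.Dict.get? pvColors k).getD (255, 255, 255)

-- FACE_COLORS_SOLVED[k]; a missing key is a KeyError in Python, excluded by Pre_
def pvSolvedGet (k : Int × Int) : String :=
  (PySem.Dict.get? pvSolved k).getD "hidden"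

-- cubelet_pos_id[i] for i ∈ {0,1,2} (A only indexes with the loop variable)
def pvIdxA (p : Int × Int × Int) (i : Int) : Int :=
  if i = 0 then p.1 else if i = 1 then p.2.1 else p.2.2

-- the `for axis_idx in range(3)` loop with early return
def pvLoopA (pos : Int × Int × Int) (fn : Int × Int) : List Int → Int × Int × Int
  | [] => pvColorsGet "hidden"
  | i :: rest =>
    if pvIdxA pos i = fn.2 ∧ i = fn.1 then
      pvColorsGet (pvSolvedGet (i, pvIdxA pos i))
    else pvLoopA pos fn rest

def get_face_color_py (cubelet_pos_id : Int × Int × Int) (face_normal_in_cubelet_frame : Int × Int) : Int × Int × Int :=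
  pvLoopA cubelet_pos_id face_normal_in_cubelet_frame (PySem.List.pyRange 0 3 1)

-- ===== PORT B =====
-- the flat _SOLVED_RGB list of Source B
def pvSolvedRGB : List (Int × Int × Int) :=
  [(255, 0, 0), (255, 120, 0), (255, 255, 0), (255, 255, 255), (0, 0, 255), (0, 128, 0)]

-- cubelet_pos_id[axis], used only under the 0 ≤ axis < 3 guard
def pvCoordB (p : Int × Int × Int) (axis : Int) : Int :=
  if axis = 0 then p.1 else if axis = 1 then p.2.1 else p.2.2

def get_face_color_py_alt (cubelet_pos_id : Int × Int × Int) (face_normal_in_cubelet_frame : Int × Int) : Int × Int × Int :=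
  let axis := face_normal_in_cubelet_frame.1
  let direction := face_normal_in_cubelet_frame.2
  if direction * direction = 1 ∧ 0 ≤ axis ∧ axis < 3 ∧ pvCoordB cubelet_pos_id axis = direction then
    (PySem.List.pyGet? pvSolvedRGB (2 * axis + PySem.Int.floordiv (1 - direction) 2)).getD (255, 255, 255)
  else
    (255, 255, 255)

-- ===== PRECONDITION & SPEC =====
-- Pre_ excludes exactly the inputs where A raises KeyError: the face axis is 0, 1 or 2,
-- the matching cubelet coordinate equals the direction, but the direction is neither
-- 1 nor -1, so the FACE_COLORS_SOLVED lookup fails.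
def Pre_get_face_color_py (cubelet_pos_id : Int × Int × Int) (face_normal_in_cubelet_frame : Int × Int) : Prop :=
  ¬ (0 ≤ face_normal_in_cubelet_frame.1 ∧ face_normal_in_cubelet_frame.1 < 3 ∧
     pvCoordB cubelet_pos_id face_normal_in_cubelet_frame.1 = face_normal_in_cubelet_frame.2 ∧
     face_normal_in_cubelet_frame.2 ≠ 1 ∧ face_normal_in_cubelet_frame.2 ≠ -1)
instance (cubelet_pos_id : Int × Int × Int) (face_normal_in_cubelet_frame : Int × Int) : Decidable (Pre_get_face_color_py cubelet_pos_id face_normal_in_cubelet_frame) := by unfold Pre_get_face_color_py; infer_instance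

def pvWitness_get_face_color_py : (Int × Int × Int) × (Int × Int) := ((1, -1, 1), (0, 1))

def Spec_get_face_color_py (cubelet_pos_id : Int × Int × Int) (face_normal_in_cubelet_frame : Int × Int) (out : Int × Int × Int) : Prop := out = get_face_color_py_alt cubelet_pos_id face_normal_in_cubelet_frame
instance (cubelet_pos_id : Int × Int × Int) (face_normal_in_cubelet_frame : Int × Int) (out : Int × Int × Int) : Decidable (Spec_get_face_color_py cubelet_pos_id face_normal_in_cubelet_frame out) := by unfold Spec_get_face_color_py; infer_instance

-- ===== CLAIM (what is proved, stated in full; the proofs are below) =====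
def Claim_equal_get_face_color_py : Prop := ∀ (cubelet_pos_id : Int × Int × Int) (face_normal_in_cubelet_frame : Int × Int), Dom_get_face_color_py cubelet_pos_id face_normal_in_cubelet_frame → Pre_get_face_color_py cubelet_pos_id face_normal_in_cubelet_frame → Spec_get_face_color_py cubelet_pos_id face_normal_in_cubelet_frame (get_face_color_py cubelet_pos_id face_normal_in_cubelet_frame)


-- ===== LEMMAS AND PROOFS =====
theorem pvRange3 : PySem.List.pyRange 0 3 1 = [0, 1, 2] := by decide

-- the hidden color, evaluated once
theorem pvChid : pvColorsGet "hidden" = (255, 255, 255) := by decide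

-- one axis in range: both sides, given whether the matching coordinate equals d
theorem pvAxisCase (pos : Int × Int × Int) (a d : Int)
    (hpre : Pre_get_face_color_py pos (a, d)) (ha : 0 ≤ a ∧ a < 3) :
    (if pvCoordB pos a = d then pvColorsGet (pvSolvedGet (a, pvCoordB pos a)) else pvColorsGet "hidden")
      = get_face_color_py_alt pos (a, d) := by
  unfold get_face_color_py_alt
  unfold Pre_get_face_color_py at hpre
  by_cases hm : pvCoordB pos a = d
  · have hd : d = 1 ∨ d = -1 := by
      by_contra hc
      push Not at hc
      exact hpre ⟨ha.1, ha.2, hm, hc.1, hc.2⟩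
    have ha' : a = 0 ∨ a = 1 ∨ a = 2 := by omega
    rcases ha' with h | h | h <;> subst h <;> rcases hd with h | h <;> subst h <;>
      simp [hm] <;> decide
  · simp [hm, pvChid, ha.1, ha.2]

-- ===== VERDICT (by name: the statement is the Claim_ definition above) =====
theorem get_face_color_py_spec : Claim_equal_get_face_color_py := by
  intro pos fn _ hpre
  unfold Spec_get_face_color_py get_face_color_py
  rw [pvRange3]
  rcases fn with ⟨a, d⟩
  by_cases ha : 0 ≤ a ∧ a < 3
  · have key := pvAxisCase pos a d hpre ha
    have ha' : a = 0 ∨ a = 1 ∨ a = 2 := by omega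
    rcases ha' with h | h | h <;> subst h <;>
      simpa [pvLoopA, pvIdxA, pvCoordB] using key
  · have c1 : ¬(pos.1 = d ∧ (0 : Int) = a) := by omega
    have c2 : ¬(pos.2.1 = d ∧ (1 : Int) = a) := by omega
    have c3 : ¬(pos.2.2 = d ∧ (2 : Int) = a) := by omega
    have calt : ¬(d * d = 1 ∧ 0 ≤ a ∧ a < 3 ∧ pvCoordB pos a = d) :=
      fun h => ha ⟨h.2.1, h.2.2.1⟩
    unfold get_face_color_py_alt
    simp [pvLoopA, pvIdxA, pvChid, c1, c2, c3, calt]
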